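-- pv_equiv track=rewrite | github.com/marcelaRivera/proyectoOptimizacion | src/initialSolution.py | getEmployersCalificatesInJobs
-- ===== SOURCE A (Python) =====
-- def getEmployersCalificatesInJobs(jobsCalificate, jobs):
-- 	workers = []
-- 	for t in range(jobs):
-- 		cont = 0
-- 		workersAux = []
-- 		for i in jobsCalificate:
-- 			for j in i:
-- 				if t == int(j):
-- 					workersAux.append(cont)
-- 			cont = cont + 1
-- 		workers.append(workersAux)
-- 	return workers
-- ===== SOURCE B (Python) =====
-- def getEmployersCalificatesInJobs(jobsCalificate, jobs):
-- 	workers = [[] for _ in range(jobs)]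
-- 	for cont, quals in enumerate(jobsCalificate):
-- 		for j in quals:
-- 			j = int(j)
-- 			if 0 <= j < jobs:
-- 				workers[j].append(cont)
-- 	return workers
-- ===== Notes on version B (the rewrite author's own statement) =====
-- stated objective: faster
-- what changed: Instead of rescanning the whole qualification matrix once per job, B preallocates one bucket per job and makes a single pass over the workers, appending each worker index into the bucket of every job it qualifies for.
import Mathlib
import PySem

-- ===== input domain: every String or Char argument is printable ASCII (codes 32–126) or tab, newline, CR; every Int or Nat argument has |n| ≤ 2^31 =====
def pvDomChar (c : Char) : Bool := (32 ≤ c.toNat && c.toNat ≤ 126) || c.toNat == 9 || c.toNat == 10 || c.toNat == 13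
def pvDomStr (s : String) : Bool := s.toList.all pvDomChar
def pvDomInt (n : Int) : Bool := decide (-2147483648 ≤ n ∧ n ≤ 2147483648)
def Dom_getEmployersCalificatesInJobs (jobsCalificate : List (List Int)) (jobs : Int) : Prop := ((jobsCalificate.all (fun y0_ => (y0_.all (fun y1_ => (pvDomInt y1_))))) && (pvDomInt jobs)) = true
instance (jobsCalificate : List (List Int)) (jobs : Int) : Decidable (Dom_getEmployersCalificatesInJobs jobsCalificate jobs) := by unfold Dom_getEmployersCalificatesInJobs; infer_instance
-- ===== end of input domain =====

-- B replaces A's per-job rescans of the whole matrix by a single bucketing pass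
-- over the workers, appending each worker index into the bucket of every job it
-- qualifies for (objective: faster, O(jobs * total) → O(jobs + total)).

-- ===== PORT A =====
-- for t in range(jobs): rebuild workersAux by scanning all of jobsCalificate with counter cont
def getEmployersCalificatesInJobs (jobsCalificate : List (List Int)) (jobs : Int) : List (List Int) :=
  (PySem.List.pyRange 0 jobs 1).foldl (fun workers t =>
    let p := jobsCalificate.foldl (fun (p : List Int × Int) i =>
      (i.foldl (fun aux j => if t = j then aux ++ [p.2] else aux) p.1, p.2 + 1)) ([], 0)
    workers ++ [p.1]) []

-- ===== PORT B =====
-- workers = [[] for _ in range(jobs)]; one pass: workers[j].append(cont) for each in-range j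
def getEmployersCalificatesInJobs_alt (jobsCalificate : List (List Int)) (jobs : Int) : List (List Int) :=
  (PySem.List.enumerate jobsCalificate 0).foldl (fun workers ci =>
    ci.2.foldl (fun w j =>
      if 0 ≤ j ∧ j < jobs then w.modify j.toNat (· ++ [ci.1]) else w) workers)
    (List.replicate jobs.toNat [])

-- ===== PRECONDITION & SPEC =====
def Spec_getEmployersCalificatesInJobs (jobsCalificate : List (List Int)) (jobs : Int) (out : List (List Int)) : Prop := out = getEmployersCalificatesInJobs_alt jobsCalificate jobs
instance (jobsCalificate : List (List Int)) (jobs : Int) (out : List (List Int)) : Decidable (Spec_getEmployersCalificatesInJobs jobsCalificate jobs out) := by unfold Spec_getEmployersCalificatesInJobs; infer_instance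

-- ===== CLAIM (what is proved, stated in full; the proofs are below) =====
def Claim_equal_getEmployersCalificatesInJobs : Prop := ∀ (jobsCalificate : List (List Int)) (jobs : Int), Dom_getEmployersCalificatesInJobs jobsCalificate jobs → Spec_getEmployersCalificatesInJobs jobsCalificate jobs (getEmployersCalificatesInJobs jobsCalificate jobs)

-- ===== LEMMAS AND PROOFS =====

-- the occurrences of job t in jobsCalificate, as the list of worker counters (starting at c)
def pvBkt (t : Int) : List (List Int) → Int → List Int
  | [], _ => []
  | i :: r, c => (i.filter (fun j => t == j)).map (fun _ => c) ++ pvBkt t r (c + 1)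

-- A-side characterisation
theorem pvA_inner (t c : Int) (i : List Int) (a : List Int) :
    i.foldl (fun aux j => if t = j then aux ++ [c] else aux) a
      = a ++ (i.filter (fun j => t == j)).map (fun _ => c) := by
  induction i generalizing a with
  | nil => simp
  | cons j r ih =>
    rw [List.foldl_cons]
    by_cases h : t = j
    · rw [if_pos h, ih]; simp [h]
    · rw [if_neg h, ih]; simp [h]

theorem pvA_fold (t : Int) (jc : List (List Int)) (a : List Int) (c : Int) :
    (jc.foldl (fun (p : List Int × Int) i =>
        (i.foldl (fun aux j => if t = j then aux ++ [p.2] else aux) p.1, p.2 + 1)) (a, c)).1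
      = a ++ pvBkt t jc c := by
  induction jc generalizing a c with
  | nil => simp [pvBkt]
  | cons i r ih =>
    simp only [List.foldl_cons]
    rw [pvA_inner, ih]
    simp [pvBkt]

theorem pvA_eq_map (jc : List (List Int)) (jobs : Int) :
    getEmployersCalificatesInJobs jc jobs
      = (PySem.List.pyRange 0 jobs 1).map (fun t => pvBkt t jc 0) := by
  unfold getEmployersCalificatesInJobs
  have : ∀ (l : List Int) (a : List (List Int)),
      l.foldl (fun workers t =>
        let p := jc.foldl (fun (p : List Int × Int) i =>
          (i.foldl (fun aux j => if t = j then aux ++ [p.2] else aux) p.1, p.2 + 1)) ([], 0)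
        workers ++ [p.1]) a = a ++ l.map (fun t => pvBkt t jc 0) := by
    intro l
    induction l with
    | nil => simp
    | cons t r ih =>
      intro a
      rw [List.foldl_cons, ih]
      simp [pvA_fold]
  simpa using this (PySem.List.pyRange 0 jobs 1) []

-- B-side: length is preserved by the bucketing fold
theorem pvB_len_inner (jobs c : Int) (i : List Int) (w : List (List Int)) :
    (i.foldl (fun w j => if 0 ≤ j ∧ j < jobs then w.modify j.toNat (· ++ [c]) else w) w).length
      = w.length := by
  induction i generalizing w with
  | nil => rfl
  | cons j r ih => by_cases h : 0 ≤ j ∧ j < jobs <;> simp [List.foldl_cons, h, ih]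

-- B-side: one inner fold appends exactly the occurrences of job k to bucket k
theorem pvB_inner (jobs c : Int) (i : List Int) (w : List (List Int)) (k : Nat)
    (hw : w.length = jobs.toNat) :
    (i.foldl (fun w j => if 0 ≤ j ∧ j < jobs then w.modify j.toNat (· ++ [c]) else w) w)[k]?
      = w[k]?.map (· ++ (i.filter (fun j => (k : Int) == j)).map (fun _ => c)) := by
  induction i generalizing w with
  | nil => cases h : w[k]? <;> simp [h]
  | cons j r ih =>
    rw [List.foldl_cons]
    by_cases hg : 0 ≤ j ∧ j < jobs
    · have hw' : (w.modify j.toNat (· ++ [c])).length = jobs.toNat := by simp [hw]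
      rw [if_pos hg, ih _ hw', List.getElem?_modify]
      by_cases hk : (k : Int) = j
      · have hjk : j.toNat = k := by omega
        simp [hjk, hk, Option.map_map, Function.comp_def]
      · have hjk : ¬ (j.toNat = k) := by omega
        simp only [List.filter_cons, beq_iff_eq, hk, ite_false]
        cases h : w[k]? with
        | none => simp
        | some l => simp [hjk]
    · rw [if_neg hg, ih _ hw]
      by_cases hk2 : k < jobs.toNat
      · have hk : ¬ ((k : Int) = j) := by
          intro h; exact hg ⟨by omega, by omega⟩
        simp [hk]
      · have hnone : w[k]? = none := List.getElem?_eq_none (by omega)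
        simp [hnone]

-- B-side: the whole enumerate fold appends bucket k's contents to slot k
theorem pvB_fold (jobs : Int) (jc : List (List Int)) (w : List (List Int)) (c : Int) (k : Nat)
    (hw : w.length = jobs.toNat) :
    ((PySem.List.enumerate jc c).foldl (fun w ci =>
        ci.2.foldl (fun w j => if 0 ≤ j ∧ j < jobs then w.modify j.toNat (· ++ [ci.1]) else w) w) w)[k]?
      = w[k]?.map (· ++ pvBkt (k : Int) jc c) := by
  induction jc generalizing w c with
  | nil =>
    cases h : w[k]? <;> simp [PySem.List.enumerate_nil, pvBkt, h]
  | cons i r ih =>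
    rw [PySem.List.enumerate_cons, List.foldl_cons]
    have hw' : (i.foldl (fun w j => if 0 ≤ j ∧ j < jobs then w.modify j.toNat (· ++ [c]) else w) w).length
        = jobs.toNat := by rw [pvB_len_inner]; exact hw
    rw [ih _ _ hw', pvB_inner jobs c i w k hw]
    cases h : w[k]? <;> simp [pvBkt]

-- ===== VERDICT (by name: the statement is the Claim_ definition above) =====
theorem getEmployersCalificatesInJobs_spec : Claim_equal_getEmployersCalificatesInJobs := by
  intro jc jobs _
  unfold Spec_getEmployersCalificatesInJobs
  apply List.ext_getElem?
  intro k
  rw [pvA_eq_map]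
  unfold getEmployersCalificatesInJobs_alt
  rw [pvB_fold jobs jc _ 0 k (by simp), List.getElem?_map, List.getElem?_replicate]
  by_cases hk : k < jobs.toNat
  · rw [PySem.List.getElem?_pyRange_one]
    simp [hk]
  · have h1 : (PySem.List.pyRange 0 jobs 1)[k]? = none :=
      List.getElem?_eq_none (by simp [PySem.List.length_pyRange_one]; omega)
    simp [hk]
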